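-- pv_equiv track=rewrite | github.com/krocriux/TICS311 | semana_19_03/Taller/UniqueDigits/DistinguishableSetDiv2.py | index_status
-- ===== SOURCE A (Python) =====
-- def index_status(answer) :
--     n = len(answer)
--     len_ans = len(answer[0])
--     answer = [list(i) for i in answer]
--     index_status = [False]*len_ans
--     for j in range(len_ans) :
--         list1 = []
--         for i in range(n) :
--             list1.append(answer[i][j])
--         list2 = set(list1)
--         if len(list1) == len(list2) :
--             index_status[j] = True
--     return index_status
-- ===== SOURCE B (Python) =====
-- def index_status(answer):
--     m = len(answer[0])
--     state = [(True, set()) for _ in range(m)]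
--     for row in answer:
--         state = [(ok and c not in s, s | {c}) for (ok, s), c in zip(state, row)]
--     return [ok for ok, _ in state]
-- ===== Notes on version B (the rewrite author's own statement) =====
-- stated objective: alternative
-- what changed: Column-major double loop that materializes each column list and compares len(list) to len(set) is replaced by a single row-major pass that threads one (still-distinct flag, seen-set) pair per column through zip, detecting duplicates incrementally.
import Mathlib
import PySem

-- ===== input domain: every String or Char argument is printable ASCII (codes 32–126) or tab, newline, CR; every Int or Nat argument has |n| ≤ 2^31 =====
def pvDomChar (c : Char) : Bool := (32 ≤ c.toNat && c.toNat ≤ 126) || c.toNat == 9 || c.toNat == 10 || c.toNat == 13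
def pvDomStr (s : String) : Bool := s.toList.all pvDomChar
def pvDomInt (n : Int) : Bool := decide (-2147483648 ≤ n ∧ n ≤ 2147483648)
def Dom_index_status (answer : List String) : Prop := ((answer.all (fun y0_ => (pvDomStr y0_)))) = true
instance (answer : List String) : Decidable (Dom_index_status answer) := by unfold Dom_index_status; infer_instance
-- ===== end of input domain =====

-- B replaces A's column-major scans by one row-major pass with per-column seen-sets (alternative decomposition, same cost).

-- ===== PORT A =====
def index_status (answer : List String) : List Bool :=
  let n := answer.length
  let lenAns := ((PySem.List.pyGet? answer 0).getD "").toList.length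
  let rows := answer.map String.toList
  (List.range lenAns).foldl (fun st j =>
    let list1 := (List.range n).foldl (fun l i => l ++ [(rows.getD i []).getD j ' ']) ([] : List Char)
    let list2 := PySem.Set.ofList list1
    if list1.length = list2.length then st.set j true else st)
    (List.replicate lenAns false)

-- ===== PORT B =====
def index_status_alt (answer : List String) : List Bool :=
  let m := ((PySem.List.pyGet? answer 0).getD "").toList.length
  let state0 : List (Bool × PySem.Set Char) := (List.range m).map (fun _ => (true, PySem.Set.empty))
  let final := answer.foldl (fun st row =>
    List.zipWith (fun (p : Bool × PySem.Set Char) c =>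
      (p.1 && !(PySem.Set.contains p.2 c), PySem.Set.union p.2 [c])) st row.toList) state0
  final.map (·.1)

-- ===== PRECONDITION & SPEC =====
-- Pre_ excludes exactly the inputs where Python A raises IndexError: the empty list (answer[0])
-- and ragged inputs where some row is shorter than the first row (answer[i][j]).
def Pre_index_status (answer : List String) : Prop :=
  answer ≠ [] ∧ ∀ s ∈ answer, (answer.headD "").toList.length ≤ s.toList.length
instance (answer : List String) : Decidable (Pre_index_status answer) := by unfold Pre_index_status; infer_instance

def pvWitness_index_status : List String := ["abc", "axc"]

def Spec_index_status (answer : List String) (out : List Bool) : Prop := out = index_status_alt answer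
instance (answer : List String) (out : List Bool) : Decidable (Spec_index_status answer out) := by unfold Spec_index_status; infer_instance

-- ===== CLAIM (what is proved, stated in full; the proofs are below) =====
def Claim_equal_index_status : Prop := ∀ (answer : List String), Dom_index_status answer → Pre_index_status answer → Spec_index_status answer (index_status answer)

-- ===== LEMMAS AND PROOFS =====

-- column j of the rows, read with the (never-used under Pre_) default ' '
def colOf (rows : List (List Char)) (j : Nat) : List Char := rows.map (fun r => r.getD j ' ')

-- A's inner loop builds exactly column j
lemma list1_eq_colOf (rows : List (List Char)) (j : Nat) :
    (List.range rows.length).foldl (fun l i => l ++ [(rows.getD i []).getD j ' ']) ([] : List Char)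
      = colOf rows j := by
  rw [PySem.List.foldl_append_singleton_eq_map]
  simp only [List.nil_append, colOf]
  apply List.ext_getElem
  · simp
  · intro i h1 h2
    simp only [List.length_map] at h2
    simp [List.getElem?_eq_getElem h2]

-- size of the dedup set equals the size of the list iff the list has no duplicates
lemma ofList_length_le (l : List Char) : (PySem.Set.ofList l).length ≤ l.length := by
  induction l using List.reverseRecOn with
  | nil => simp [PySem.Set.ofList, PySem.Set.empty]
  | append_singleton l x ih =>
      have h : PySem.Set.ofList (l ++ [x]) = PySem.Set.add (PySem.Set.ofList l) x := by
        simp [PySem.Set.ofList, List.foldl_append]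
      rw [h, PySem.Set.add]
      split
      · simp only [List.length_append, List.length_singleton]; omega
      · simp only [List.length_append, List.length_singleton]; omega

lemma ofList_length_eq_iff (l : List Char) : (PySem.Set.ofList l).length = l.length ↔ l.Nodup := by
  induction l using List.reverseRecOn with
  | nil => simp [PySem.Set.ofList, PySem.Set.empty]
  | append_singleton l x ih =>
      have h : PySem.Set.ofList (l ++ [x]) = PySem.Set.add (PySem.Set.ofList l) x := by
        simp [PySem.Set.ofList, List.foldl_append]
      have hc : (PySem.Set.ofList l).contains x = decide (x ∈ l) := by
        simp [PySem.Set.contains, PySem.Set.mem_ofList]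
      have hle := ofList_length_le l
      rw [h, PySem.Set.add, hc]
      by_cases hx : x ∈ l
      · have hnd : ¬ (l ++ [x]).Nodup := by simp [List.nodup_append, hx]
        simp only [hx, decide_true, if_true, hnd, iff_false, List.length_append,
          List.length_singleton]
        omega
      · have hnd : (l ++ [x]).Nodup ↔ l.Nodup := by
          simp only [List.nodup_append]
          refine ⟨fun ⟨h1, _⟩ => h1, fun h1 => ⟨h1, by simp, ?_⟩⟩
          intro a ha b hb
          simp only [List.mem_singleton] at hb
          exact fun he => hx ((he.trans hb) ▸ ha)
        simp only [hx, decide_false, if_false, Bool.false_eq_true, List.length_append,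
          List.length_singleton, hnd, ← ih]
        omega

-- setting indices below the length of L never touches an appended tail
lemma foldl_set_append (g : Nat → Bool) (js : List Nat) (L tail : List Bool)
    (h : ∀ j ∈ js, j < L.length) :
    js.foldl (fun st j => if g j then st.set j true else st) (L ++ tail)
      = js.foldl (fun st j => if g j then st.set j true else st) L ++ tail := by
  induction js generalizing L with
  | nil => rfl
  | cons j js ih =>
      have hj : j < L.length := h j (by simp)
      simp only [List.foldl_cons]
      by_cases hg : g j
      · rw [if_pos hg, if_pos hg, List.set_append_left _ _ hj]
        exact ih (L.set j true) (by simpa using fun k hk => h k (by simp [hk]))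
      · rw [if_neg hg, if_neg hg]
        exact ih L (fun k hk => h k (by simp [hk]))

-- A's outer loop over an all-False list of length m produces the pointwise map of the condition
lemma foldl_set_range (g : Nat → Bool) (m : Nat) :
    (List.range m).foldl (fun st j => if g j then st.set j true else st) (List.replicate m false)
      = (List.range m).map g := by
  induction m with
  | zero => rfl
  | succ m ih =>
      rw [List.range_succ, List.replicate_succ', List.foldl_append,
          foldl_set_append g _ _ _ (by simp), ih]
      simp only [List.foldl_cons, List.foldl_nil, List.map_append, List.map_cons,
        List.map_nil]
      by_cases hg : g m
      · rw [if_pos hg, List.set_append_right _ _ (by simp)]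
        simp [hg]
      · rw [if_neg hg]
        simp [hg]

-- B's zipWith step on a row long enough acts pointwise on the range-map state
lemma zip_step {β : Type} (m : Nat) (g : Nat → β)
    (F : β → Char → β) (row : List Char) (h : m ≤ row.length) :
    List.zipWith F ((List.range m).map g) row
      = (List.range m).map (fun j => F (g j) (row.getD j ' ')) := by
  apply List.ext_getElem
  · simp; omega
  · intro i h1 h2
    have hi : i < m := by simpa using h2
    have hr : i < row.length := lt_of_lt_of_le hi h
    simp [List.getElem_zipWith, hr]

-- one column step: feeding the next character updates (nodup-flag, seen-set) to the longer column's
lemma col_step (col : List Char) (c : Char) :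
    ((decide col.Nodup && !(PySem.Set.contains (PySem.Set.ofList col) c) : Bool),
      PySem.Set.union (PySem.Set.ofList col) [c])
    = ((decide (col ++ [c]).Nodup : Bool), PySem.Set.ofList (col ++ [c])) := by
  have h1 : PySem.Set.ofList (col ++ [c]) = PySem.Set.add (PySem.Set.ofList col) c := by
    simp [PySem.Set.ofList, List.foldl_append]
  have h2 : PySem.Set.union (PySem.Set.ofList col) [c] = PySem.Set.add (PySem.Set.ofList col) c := rfl
  have h3 : (PySem.Set.ofList col).contains c = decide (c ∈ col) := by
    simp [PySem.Set.contains, PySem.Set.mem_ofList]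
  rw [h2, h1, h3]
  by_cases hc : c ∈ col
  · have hnd : ¬ (col ++ [c]).Nodup := by simp [List.nodup_append, hc]
    simp [hc, hnd]
  · have hnd : (col ++ [c]).Nodup ↔ col.Nodup := by
      simp only [List.nodup_append]
      refine ⟨fun ⟨h1, _⟩ => h1, fun h1 => ⟨h1, by simp, ?_⟩⟩
      intro a ha b hb
      simp only [List.mem_singleton] at hb
      exact fun he => hc ((he.trans hb) ▸ ha)
    simp [hc, hnd]

-- B's row loop invariant: the state is the per-column (nodup?, seen-set) of the rows processed so far
lemma B_fold (m : Nat) (rows pre : List (List Char)) (h : ∀ r ∈ rows, m ≤ r.length) :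
    rows.foldl (fun st row =>
        List.zipWith (fun (p : Bool × PySem.Set Char) c =>
          (p.1 && !(PySem.Set.contains p.2 c), PySem.Set.union p.2 [c])) st row)
      ((List.range m).map (fun j => ((decide (colOf pre j).Nodup : Bool), PySem.Set.ofList (colOf pre j))))
    = (List.range m).map (fun j =>
        ((decide (colOf (pre ++ rows) j).Nodup : Bool), PySem.Set.ofList (colOf (pre ++ rows) j))) := by
  induction rows generalizing pre with
  | nil => rw [List.foldl_nil, List.append_nil]
  | cons r rows ih =>
      simp only [List.foldl_cons]
      rw [zip_step m _ _ r (h r (by simp))]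
      have hcol : ∀ j, colOf (pre ++ [r]) j = colOf pre j ++ [r.getD j ' '] := by
        intro j; simp [colOf]
      have : ((List.range m).map fun j =>
          ((fun (p : Bool × PySem.Set Char) c =>
            (p.1 && !(PySem.Set.contains p.2 c), PySem.Set.union p.2 [c]))
            ((decide (colOf pre j).Nodup : Bool), PySem.Set.ofList (colOf pre j)) (r.getD j ' ')))
          = (List.range m).map (fun j =>
              ((decide (colOf (pre ++ [r]) j).Nodup : Bool), PySem.Set.ofList (colOf (pre ++ [r]) j))) := by
        apply List.map_congr_left
        intro j _
        simpa [hcol j] using col_step (colOf pre j) (r.getD j ' ')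
      rw [this]
      have := ih (pre ++ [r]) (fun x hx => h x (by simp [hx]))
      simpa using this

-- ===== VERDICT (by name: the statement is the Claim_ definition above) =====
theorem index_status_spec : Claim_equal_index_status := by
  intro answer _ hpre
  obtain ⟨hne, hlen⟩ := hpre
  obtain ⟨a, rest, rfl⟩ : ∃ a rest, answer = a :: rest := by
    cases answer with
    | nil => exact absurd rfl hne
    | cons a rest => exact ⟨a, rest, rfl⟩
  unfold Spec_index_status index_status index_status_alt
  have hget : PySem.List.pyGet? (a :: rest) 0 = some a := by
    simp [PySem.List.pyGet?, PySem.List.pyIdx?]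
  simp only [hget, Option.getD_some]
  set m := a.toList.length with hm
  set rows := (a :: rest).map String.toList with hrows
  -- A side
  have hA : ∀ j, ((List.range rows.length).foldl
        (fun l i => l ++ [(rows.getD i []).getD j ' ']) ([] : List Char)) = colOf rows j :=
    fun j => list1_eq_colOf rows j
  have hAstep : ∀ (st : List Bool), ∀ j ∈ List.range m,
      (let list1 := (List.range rows.length).foldl (fun l i => l ++ [(rows.getD i []).getD j ' ']) ([] : List Char)
       let list2 := PySem.Set.ofList list1
       if list1.length = list2.length then st.set j true else st)
      = (if (decide (colOf rows j).Nodup : Bool) then st.set j true else st) := by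
    intro st j _
    simp only [hA j]
    by_cases h : (colOf rows j).Nodup
    · rw [if_pos (by rw [eq_comm, ofList_length_eq_iff]; exact h), if_pos (by simp [h])]
    · rw [if_neg (by rw [eq_comm, ofList_length_eq_iff]; exact h), if_neg (by simp [h])]
  rw [show (a :: rest).length = rows.length by simp [hrows]]
  rw [List.foldl_ext _ _ _ hAstep, foldl_set_range]
  -- B side
  have hrowlen : ∀ r ∈ rows, m ≤ r.length := by
    intro r hr
    simp only [hrows, List.mem_map] at hr
    obtain ⟨s, hs, rfl⟩ := hr
    simpa [hm] using hlen s hs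
  have hinit : ((List.range m).map (fun _ => ((true : Bool), (PySem.Set.empty : PySem.Set Char))))
      = (List.range m).map (fun j => ((decide (colOf ([] : List (List Char)) j).Nodup : Bool),
          PySem.Set.ofList (colOf ([] : List (List Char)) j))) := by
    apply List.map_congr_left
    intro j _
    simp [colOf, PySem.Set.ofList, PySem.Set.empty]
  have hB : ((a :: rest).foldl (fun st row =>
      List.zipWith (fun (p : Bool × PySem.Set Char) c =>
        (p.1 && !(PySem.Set.contains p.2 c), PySem.Set.union p.2 [c])) st row.toList)
      ((List.range m).map (fun _ => ((true : Bool), (PySem.Set.empty : PySem.Set Char)))))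
      = (List.range m).map (fun j =>
          ((decide (colOf rows j).Nodup : Bool), PySem.Set.ofList (colOf rows j))) := by
    rw [hinit]
    have heq : (a :: rest).foldl (fun st row =>
        List.zipWith (fun (p : Bool × PySem.Set Char) c =>
          (p.1 && !(PySem.Set.contains p.2 c), PySem.Set.union p.2 [c])) st row.toList)
        ((List.range m).map (fun j => ((decide (colOf ([] : List (List Char)) j).Nodup : Bool),
            PySem.Set.ofList (colOf ([] : List (List Char)) j))))
        = rows.foldl (fun st row =>
            List.zipWith (fun (p : Bool × PySem.Set Char) c =>
              (p.1 && !(PySem.Set.contains p.2 c), PySem.Set.union p.2 [c])) st row)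
          ((List.range m).map (fun j => ((decide (colOf ([] : List (List Char)) j).Nodup : Bool),
              PySem.Set.ofList (colOf ([] : List (List Char)) j)))) := by
      rw [hrows, List.foldl_map]
    rw [heq]
    simpa using B_fold m rows [] hrowlen
  rw [hB, List.map_map]
  rfl
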